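-- pv_equiv track=rewrite | github.com/appodoom/website | inference-model/generate_sound.py | parse_beats
-- ===== SOURCE A (Python) =====
-- from typing import List, Optional, Tuple
--
-- def parse_beats(tokens: List[str]) -> Tuple[List[List[str]], int]:
--     """
--     Keep ONLY complete beats: those that start with <SOB> and end with <EOB>.
--     Inside a beat, keep SUBD_*, POS_*, HIT_* tokens (new JSON format).
--     """
--     beats: List[List[str]] = []
--     cur: Optional[List[str]] = None
--     skipped = 0
--
--     for t in tokens:
--         if t == "<SOB>":
--             if cur is not None:
--                 skipped += 1  # previous beat never closed
--             cur = []
--             continue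
--
--         if t == "<EOB>":
--             if cur is not None:
--                 beats.append(cur)
--                 cur = None
--             continue
--
--         if t in ("<SOC>", "<EOC>"):
--             if cur is not None:
--                 skipped += 1
--                 cur = None
--             continue
--
--         if cur is not None:
--             if t.startswith("SUBD_") or t.startswith("POS_") or t.startswith("HIT_"):
--                 cur.append(t)
--
--     if cur is not None:
--         skipped += 1
--
--     return beats, skipped
-- ===== SOURCE B (Python) =====
-- def parse_beats(tokens):
--     """Index-driven scanner: skip to each <SOB>, collect the beat body in an
--     inner loop, then dispatch on the terminator."""
--     beats = []
--     skipped = 0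
--     i, n = 0, len(tokens)
--     while i < n:
--         if tokens[i] != "<SOB>":
--             i += 1
--             continue
--         i += 1
--         cur = []
--         while i < n and tokens[i] not in ("<SOB>", "<EOB>", "<SOC>", "<EOC>"):
--             t = tokens[i]
--             if t.startswith("SUBD_") or t.startswith("POS_") or t.startswith("HIT_"):
--                 cur.append(t)
--             i += 1
--         if i == n:
--             skipped += 1          # stream ended with the beat still open
--         elif tokens[i] == "<EOB>":
--             beats.append(cur)
--             i += 1
--         elif tokens[i] == "<SOB>":
--             skipped += 1          # leave i at the new <SOB>: it starts a fresh beat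
--         else:                      # <SOC> / <EOC>
--             skipped += 1
--             i += 1
--     return beats, skipped
-- ===== Notes on version B (the rewrite author's own statement) =====
-- stated objective: alternative
-- what changed: Replaced A's per-token state machine (an Optional current-beat plus continue-laden branch chain) with an index-driven scanner: an outer loop that skips to each <SOB> and an inner loop that collects the beat body up to a terminator, then dispatches on that terminator.
import Mathlib
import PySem

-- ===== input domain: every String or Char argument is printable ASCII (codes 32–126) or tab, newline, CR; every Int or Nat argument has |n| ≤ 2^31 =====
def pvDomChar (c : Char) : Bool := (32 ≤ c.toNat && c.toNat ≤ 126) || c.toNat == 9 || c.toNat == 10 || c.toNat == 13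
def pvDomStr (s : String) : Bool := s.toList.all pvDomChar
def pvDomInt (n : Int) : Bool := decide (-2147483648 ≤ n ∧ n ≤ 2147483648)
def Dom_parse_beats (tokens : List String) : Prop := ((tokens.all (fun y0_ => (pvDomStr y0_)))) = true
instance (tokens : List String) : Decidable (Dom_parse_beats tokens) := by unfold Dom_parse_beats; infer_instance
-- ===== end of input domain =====

-- B replaces A's per-token state machine by an index-driven scanner (skip to each <SOB>,
-- collect the beat body in an inner loop, dispatch on the terminator); objective: alternative decomposition.

-- ===== PORT A =====
-- per-token state machine: state = (beats, cur : Option, skipped), folded over the tokens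
def pbStepA (st : List (List String) × Option (List String) × Int) (t : String) :
    List (List String) × Option (List String) × Int :=
  let (beats, cur, skipped) := st
  if t = "<SOB>" then
    (beats, some [], if cur.isSome then skipped + 1 else skipped)
  else if t = "<EOB>" then
    match cur with
    | some c => (beats ++ [c], none, skipped)
    | none => (beats, none, skipped)
  else if t = "<SOC>" ∨ t = "<EOC>" then
    match cur with
    | some _ => (beats, none, skipped + 1)
    | none => (beats, none, skipped)
  else
    match cur with
    | some c =>
      if PySem.Str.startswith t "SUBD_" ∨ PySem.Str.startswith t "POS_" ∨ PySem.Str.startswith t "HIT_" then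
        (beats, some (c ++ [t]), skipped)
      else (beats, some c, skipped)
    | none => (beats, none, skipped)

def parse_beats (tokens : List String) : List (List String) × Int :=
  match tokens.foldl pbStepA ([], none, 0) with
  | (beats, some _, skipped) => (beats, skipped + 1)
  | (beats, none, skipped) => (beats, skipped)

-- ===== PORT B =====
-- inner collecting loop of Source B: returns (collected body, rest of the stream starting at the terminator, or [])
def pbCollect (ts : List String) (cur : List String) : List String × List String :=
  match ts with
  | [] => (cur, [])
  | t :: ts' =>
    if t = "<SOB>" ∨ t = "<EOB>" ∨ t = "<SOC>" ∨ t = "<EOC>" then (cur, t :: ts')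
    else if PySem.Str.startswith t "SUBD_" ∨ PySem.Str.startswith t "POS_" ∨ PySem.Str.startswith t "HIT_" then
      pbCollect ts' (cur ++ [t])
    else pbCollect ts' cur

-- the collect loop never moves backwards (for termination of the scanner)
theorem pbCollect_rest_le (ts cur : List String) : (pbCollect ts cur).2.length ≤ ts.length := by
  induction ts generalizing cur with
  | nil => simp [pbCollect]
  | cons t ts' ih =>
    simp only [pbCollect]
    split
    · simp
    · split <;> exact Nat.le_succ_of_le (ih _)

mutual
-- outer while-loop of Source B: skip until a "<SOB>", then handle one beat
def pbScan (tokens : List String) : List (List String) × Int :=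
  match tokens with
  | [] => ([], 0)
  | t :: ts => if t = "<SOB>" then pbBody ts [] else pbScan ts
termination_by 2 * tokens.length
decreasing_by
  all_goals (simp only [List.length_cons]; omega)

-- one iteration of the outer loop after its inner collect loop: dispatch on the terminator
def pbBody (ts cur : List String) : List (List String) × Int :=
  match h : pbCollect ts cur with
  | (_, []) => ([], 1)
  | (c', u :: rest) =>
    if u = "<EOB>" then
      let p := pbScan rest
      (c' :: p.1, p.2)
    else if u = "<SOB>" then
      let p := pbScan (u :: rest)
      (p.1, p.2 + 1)
    else
      let p := pbScan rest
      (p.1, p.2 + 1)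
termination_by 2 * ts.length + 1
decreasing_by
  all_goals
    have := pbCollect_rest_le ts cur
    rw [h] at this
    simp at this ⊢
    omega
end

def parse_beats_alt (tokens : List String) : List (List String) × Int := pbScan tokens

-- ===== PRECONDITION & SPEC =====
def Spec_parse_beats (tokens : List String) (out : List (List String) × Int) : Prop := out = parse_beats_alt tokens
instance (tokens : List String) (out : List (List String) × Int) : Decidable (Spec_parse_beats tokens out) := by unfold Spec_parse_beats; infer_instance

-- ===== CLAIM (what is proved, stated in full; the proofs are below) =====
def Claim_equal_parse_beats : Prop := ∀ (tokens : List String), Dom_parse_beats tokens → Spec_parse_beats tokens (parse_beats tokens)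

-- ===== LEMMAS AND PROOFS =====

def pbFin (st : List (List String) × Option (List String) × Int) : List (List String) × Int :=
  match st with
  | (beats, some _, skipped) => (beats, skipped + 1)
  | (beats, none, skipped) => (beats, skipped)

theorem pbScan_sob (ts : List String) : pbScan ("<SOB>" :: ts) = pbBody ts [] := by
  rw [pbScan.eq_def]; simp

theorem pbScan_cons_ne (t : String) (ts : List String) (h : ¬ t = "<SOB>") :
    pbScan (t :: ts) = pbScan ts := by
  rw [pbScan.eq_def]; simp [h]

theorem pbBody_nil (cur : List String) : pbBody [] cur = ([], 1) := by
  rw [pbBody.eq_def]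
  have hc : pbCollect [] cur = (cur, []) := by rw [pbCollect]
  rw [hc]

theorem pbBody_eob (ts cur : List String) :
    pbBody ("<EOB>" :: ts) cur = (cur :: (pbScan ts).1, (pbScan ts).2) := by
  have hc : pbCollect ("<EOB>" :: ts) cur = (cur, "<EOB>" :: ts) := by
    rw [pbCollect]; simp
  rw [pbBody.eq_def, hc]
  simp

theorem pbBody_sob (ts cur : List String) :
    pbBody ("<SOB>" :: ts) cur = ((pbBody ts []).1, (pbBody ts []).2 + 1) := by
  have hc : pbCollect ("<SOB>" :: ts) cur = (cur, "<SOB>" :: ts) := by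
    rw [pbCollect]; simp
  rw [pbBody.eq_def, hc]
  simp [pbScan_sob]

theorem pbBody_soc (t : String) (ts cur : List String) (h : t = "<SOC>" ∨ t = "<EOC>") :
    pbBody (t :: ts) cur = ((pbScan ts).1, (pbScan ts).2 + 1) := by
  have hc : pbCollect (t :: ts) cur = (cur, t :: ts) := by
    rw [pbCollect]; simp [h]
  rw [pbBody.eq_def, hc]
  rcases h with h | h <;> subst h <;> simp

theorem pbBody_keep (t : String) (ts cur : List String)
    (hterm : ¬(t = "<SOB>" ∨ t = "<EOB>" ∨ t = "<SOC>" ∨ t = "<EOC>"))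
    (hp : PySem.Str.startswith t "SUBD_" ∨ PySem.Str.startswith t "POS_" ∨ PySem.Str.startswith t "HIT_") :
    pbBody (t :: ts) cur = pbBody ts (cur ++ [t]) := by
  have hc : pbCollect (t :: ts) cur = pbCollect ts (cur ++ [t]) := by
    rw [pbCollect]; rw [if_neg hterm, if_pos hp]
  rw [pbBody.eq_def, hc, pbBody.eq_def]

theorem pbBody_drop (t : String) (ts cur : List String)
    (hterm : ¬(t = "<SOB>" ∨ t = "<EOB>" ∨ t = "<SOC>" ∨ t = "<EOC>"))
    (hp : ¬(PySem.Str.startswith t "SUBD_" ∨ PySem.Str.startswith t "POS_" ∨ PySem.Str.startswith t "HIT_")) :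
    pbBody (t :: ts) cur = pbBody ts cur := by
  have hc : pbCollect (t :: ts) cur = pbCollect ts cur := by
    rw [pbCollect]; rw [if_neg hterm, if_neg hp]
  rw [pbBody.eq_def, hc, pbBody.eq_def]

-- the invariant: A's fold, finalized, equals B's scanner from a closed state (first part)
-- resp. B's beat body from an open state with body cur (second part)
theorem pb_main (n : Nat) : ∀ ts : List String, ts.length ≤ n →
    (∀ beats sk, pbFin (ts.foldl pbStepA (beats, none, sk)) =
        (beats ++ (pbScan ts).1, sk + (pbScan ts).2)) ∧
    (∀ beats cur sk, pbFin (ts.foldl pbStepA (beats, some cur, sk)) =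
        (beats ++ (pbBody ts cur).1, sk + (pbBody ts cur).2)) := by
  induction n with
  | zero =>
    intro ts hts
    have : ts = [] := List.eq_nil_of_length_eq_zero (Nat.le_zero.mp hts)
    subst this
    constructor
    · intro beats sk; simp [pbScan, pbFin]
    · intro beats cur sk; simp [pbBody_nil, pbFin]
  | succ n ih =>
    intro ts hts
    match ts with
    | [] =>
      constructor
      · intro beats sk; simp [pbScan, pbFin]
      · intro beats cur sk; simp [pbBody_nil, pbFin]
    | t :: ts' =>
      have hlen : ts'.length ≤ n := by simpa using hts
      constructor
      · intro beats sk
        by_cases h1 : t = "<SOB>"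
        · subst h1
          rw [pbScan_sob]
          simp only [List.foldl_cons, pbStepA]
          exact (ih ts' hlen).2 beats [] sk
        · rw [pbScan_cons_ne t ts' h1]
          by_cases h2 : t = "<EOB>"
          · subst h2
            simp only [List.foldl_cons, pbStepA]
            exact (ih ts' hlen).1 beats sk
          · by_cases h3 : t = "<SOC>" ∨ t = "<EOC>"
            · simp only [List.foldl_cons, pbStepA, if_neg h1, if_neg h2, if_pos h3]
              exact (ih ts' hlen).1 beats sk
            · simp only [List.foldl_cons, pbStepA, if_neg h1, if_neg h2, if_neg h3]
              exact (ih ts' hlen).1 beats sk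
      · intro beats cur sk
        by_cases h1 : t = "<SOB>"
        · subst h1
          rw [pbBody_sob]
          simp only [List.foldl_cons, pbStepA, Option.isSome_some, if_true]
          have := (ih ts' hlen).2 beats [] (sk + 1)
          rw [this]
          refine Prod.ext rfl ?_
          simp; ring
        · by_cases h2 : t = "<EOB>"
          · subst h2
            rw [pbBody_eob]
            simp only [List.foldl_cons, pbStepA,
              if_neg (show ¬("<EOB>" : String) = "<SOB>" by decide), if_true]
            have := (ih ts' hlen).1 (beats ++ [cur]) sk
            rw [this]
            simp
          · by_cases h3 : t = "<SOC>" ∨ t = "<EOC>"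
            · rw [pbBody_soc t ts' cur h3]
              simp only [List.foldl_cons, pbStepA, if_neg h1, if_neg h2, if_pos h3]
              have := (ih ts' hlen).1 beats (sk + 1)
              rw [this]
              refine Prod.ext rfl ?_
              simp; ring
            · have hterm : ¬(t = "<SOB>" ∨ t = "<EOB>" ∨ t = "<SOC>" ∨ t = "<EOC>") := by
                push Not at h3 ⊢; exact ⟨h1, h2, h3.1, h3.2⟩
              by_cases hp : PySem.Str.startswith t "SUBD_" ∨ PySem.Str.startswith t "POS_" ∨ PySem.Str.startswith t "HIT_"
              · rw [pbBody_keep t ts' cur hterm hp]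
                simp only [List.foldl_cons, pbStepA, if_neg h1, if_neg h2, if_neg h3, if_pos hp]
                exact (ih ts' hlen).2 beats (cur ++ [t]) sk
              · rw [pbBody_drop t ts' cur hterm hp]
                simp only [List.foldl_cons, pbStepA, if_neg h1, if_neg h2, if_neg h3, if_neg hp]
                exact (ih ts' hlen).2 beats cur sk

-- ===== VERDICT (by name: the statement is the Claim_ definition above) =====
theorem parse_beats_spec : Claim_equal_parse_beats := by
  intro tokens _
  unfold Spec_parse_beats parse_beats parse_beats_alt
  have h := (pb_main tokens.length tokens le_rfl).1 [] 0
  unfold pbFin at h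
  simpa using h
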